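-- pv_equiv track=rewrite | github.com/zoskar/Binary_search | Largest Number By Two Times.py | solve
-- ===== SOURCE A (Python) =====
-- def solve(nums):
--     big = -1
--     bigger = -1
--     for num in nums:
--         if num > bigger:
--             big = bigger
--             bigger = num
--         elif num > big:
--             big = num
--
--     return bigger > 2 * big
-- ===== SOURCE B (Python) =====
-- def solve(nums):
--     # Two-pass max/remove formulation: the -1 entries mirror the problem's -1 floor.
--     xs = list(nums) + [-1]
--     m = max(xs)
--     xs.remove(m)
--     return m > 2 * max(xs + [-1])
-- ===== Notes on version B (the rewrite author's own statement) =====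
-- stated objective: alternative
-- what changed: Replaces A's one-pass two-register (big/bigger) scan with a declarative two-pass computation: pad nums with a -1 sentinel, take the max, remove one occurrence of it, then take the max of the remainder padded with another -1 sentinel.
import Mathlib
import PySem

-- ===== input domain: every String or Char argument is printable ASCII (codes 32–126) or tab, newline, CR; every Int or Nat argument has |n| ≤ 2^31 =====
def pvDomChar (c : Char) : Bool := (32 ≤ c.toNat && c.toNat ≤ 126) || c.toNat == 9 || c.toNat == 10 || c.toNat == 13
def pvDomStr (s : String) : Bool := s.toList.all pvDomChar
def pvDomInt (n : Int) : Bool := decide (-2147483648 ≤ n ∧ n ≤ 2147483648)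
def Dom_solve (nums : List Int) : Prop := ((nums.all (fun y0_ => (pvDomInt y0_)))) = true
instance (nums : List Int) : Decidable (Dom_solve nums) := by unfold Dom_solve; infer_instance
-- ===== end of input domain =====

-- B replaces A's one-pass big/bigger scan with a two-pass max / remove / max formulation (objective: alternative; same O(n) cost).


-- ===== PORT A =====
def solve (nums : List Int) : Bool :=
  let st := nums.foldl
    (fun (st : Int × Int) num =>
      if num > st.2 then (st.2, num)
      else if num > st.1 then (num, st.2)
      else st)
    (-1, -1)
  decide (st.2 > 2 * st.1)

-- ===== PORT B =====
def solve_alt (nums : List Int) : Bool :=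
  let xs := nums ++ [-1]
  match PySem.List.max? xs (fun y => y) with
  | none => false      -- unreachable: xs is nonempty
  | some m =>
    match PySem.List.remove? xs m with
    | none => false    -- unreachable: m ∈ xs
    | some xs' =>
      match PySem.List.max? (xs' ++ [-1]) (fun y => y) with
      | none => false  -- unreachable
      | some s => decide (m > 2 * s)

-- ===== PRECONDITION & SPEC =====
def Spec_solve (nums : List Int) (out : Bool) : Prop := out = solve_alt nums
instance (nums : List Int) (out : Bool) : Decidable (Spec_solve nums out) := by unfold Spec_solve; infer_instance

-- ===== CLAIM (what is proved, stated in full; the proofs are below) =====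
def Claim_equal_solve : Prop := ∀ (nums : List Int), Dom_solve nums → Spec_solve nums (solve nums)

-- ===== LEMMAS AND PROOFS =====

-- (p, q) are "the two largest" of the multiset M: q is a maximum of M, and
-- p is a maximum of M with one copy of q removed.
def Top2 (M : Multiset Int) (p q : Int) : Prop :=
  q ∈ M ∧ (∀ y ∈ M, y ≤ q) ∧ p ∈ M.erase q ∧ (∀ y ∈ M.erase q, y ≤ p)

theorem top2_unique {M : Multiset Int} {p q p' q' : Int}
    (h : Top2 M p q) (h' : Top2 M p' q') : p = p' ∧ q = q' := by
  obtain ⟨hq, hqub, hp, hpub⟩ := h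
  obtain ⟨hq', hqub', hp', hpub'⟩ := h'
  have hqq : q = q' := le_antisymm (hqub' q hq) (hqub q' hq')
  subst hqq
  exact ⟨le_antisymm (hpub' p hp) (hpub p' hp'), rfl⟩

-- the second max of u ::ₘ v ::ₘ m is at least min u v
theorem top2_min_le {u v : Int} {m : Multiset Int} {p q : Int}
    (h : Top2 (u ::ₘ v ::ₘ m) p q) (huv : u ≤ v) : u ≤ p := by
  obtain ⟨-, -, -, hpub⟩ := h
  by_cases hqu : q = u
  · have hv : v ∈ (u ::ₘ v ::ₘ m).erase q := by
      subst hqu; rw [Multiset.erase_cons_head]; exact Multiset.mem_cons_self _ _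
    exact le_trans huv (hpub v hv)
  · have hu : u ∈ (u ::ₘ v ::ₘ m).erase q :=
      (Multiset.mem_erase_of_ne (fun h => hqu h.symm)).mpr (Multiset.mem_cons_self _ _)
    exact hpub u hu

-- adding an element c ≤ (second max) does not change the two largest
theorem top2_cons {M : Multiset Int} {p q c : Int}
    (h : Top2 M p q) (hc : c ≤ p) : Top2 (c ::ₘ M) p q := by
  obtain ⟨hq, hqub, hp, hpub⟩ := h
  have hpq : p ≤ q := hqub p (Multiset.mem_of_mem_erase hp)
  have herase : (c ::ₘ M).erase q = c ::ₘ M.erase q :=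
    Multiset.erase_cons_tail_of_mem hq
  refine ⟨Multiset.mem_cons_of_mem hq, ?_, ?_, ?_⟩
  · intro y hy
    rcases Multiset.mem_cons.mp hy with rfl | hy
    · exact le_trans hc hpq
    · exact hqub y hy
  · rw [herase]; exact Multiset.mem_cons_of_mem hp
  · intro y hy
    rw [herase] at hy
    rcases Multiset.mem_cons.mp hy with rfl | hy
    · exact hc
    · exact hpub y hy

-- A's fold computes the two largest of a ::ₘ b ::ₘ xs (when started with a ≤ b)
theorem fold_top2 (xs : List Int) : ∀ (a b : Int), a ≤ b →
    Top2 (a ::ₘ b ::ₘ (xs : Multiset Int))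
      (xs.foldl (fun (st : Int × Int) num =>
        if num > st.2 then (st.2, num)
        else if num > st.1 then (num, st.2)
        else st) (a, b)).1
      (xs.foldl (fun (st : Int × Int) num =>
        if num > st.2 then (st.2, num)
        else if num > st.1 then (num, st.2)
        else st) (a, b)).2 := by
  induction xs with
  | nil =>
    intro a b hab
    simp only [List.foldl_nil]
    refine ⟨Multiset.mem_cons_of_mem (Multiset.mem_cons_self _ _), ?_, ?_, ?_⟩
    · intro y hy
      rcases Multiset.mem_cons.mp hy with rfl | hy
      · exact hab
      · rcases Multiset.mem_cons.mp hy with rfl | hy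
        · exact le_refl _
        · simp at hy
    · rw [Multiset.cons_swap, Multiset.erase_cons_head]
      exact Multiset.mem_cons_self _ _
    · intro y hy
      rw [Multiset.cons_swap, Multiset.erase_cons_head] at hy
      rcases Multiset.mem_cons.mp hy with rfl | hy
      · exact le_refl _
      · simp at hy
  | cons x xs ih =>
    intro a b hab
    simp only [List.foldl_cons]
    by_cases h1 : x > b
    · simp only [if_pos h1]
      have htop := ih b x (le_of_lt h1)
      have hb : b ≤ _ := top2_min_le htop (le_of_lt h1)
      rw [← Multiset.cons_coe]
      exact top2_cons htop (le_trans hab hb)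
    · simp only [if_neg h1]
      by_cases h2 : x > a
      · simp only [if_pos h2]
        have htop := ih x b (le_of_not_gt h1)
        have hx : x ≤ _ := top2_min_le htop (le_of_not_gt h1)
        rw [← Multiset.cons_coe, Multiset.cons_swap b x]
        exact top2_cons htop (le_trans (le_of_lt h2) hx)
      · simp only [if_neg h2]
        have htop := ih a b hab
        have ha : a ≤ _ := top2_min_le htop hab
        rw [← Multiset.cons_coe, Multiset.cons_swap b x, Multiset.cons_swap a x]
        exact top2_cons htop (le_trans (le_of_not_gt h2) ha)

-- ===== VERDICT (by name: the statement is the Claim_ definition above) =====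
theorem solve_spec : Claim_equal_solve := by
  intro nums _
  unfold Spec_solve
  -- evaluate B's three steps
  obtain ⟨m, hm⟩ : ∃ m, PySem.List.max? (nums ++ [-1]) (fun y => y) = some m := by
    cases h : PySem.List.max? (nums ++ [-1]) (fun y => y) with
    | none => exact absurd ((PySem.List.max?_eq_none_iff _ _).mp h) (by simp)
    | some m => exact ⟨m, rfl⟩
  have hmmem : m ∈ nums ++ [-1] := PySem.List.max?_mem hm
  have hmax : ∀ y ∈ nums ++ [-1], y ≤ m := fun y hy => PySem.List.max?_isMax hm y hy
  have hrem : PySem.List.remove? (nums ++ [-1]) m = some ((nums ++ [-1]).erase m) :=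
    PySem.List.remove?_eq_some_erase _ m hmmem
  obtain ⟨s, hs⟩ : ∃ s,
      PySem.List.max? ((nums ++ [-1]).erase m ++ [-1]) (fun y => y) = some s := by
    cases h : PySem.List.max? ((nums ++ [-1]).erase m ++ [-1]) (fun y => y) with
    | none => exact absurd ((PySem.List.max?_eq_none_iff _ _).mp h) (by simp)
    | some s => exact ⟨s, rfl⟩
  have hsmem : s ∈ (nums ++ [-1]).erase m ++ [-1] := PySem.List.max?_mem hs
  have hsmax : ∀ y ∈ (nums ++ [-1]).erase m ++ [-1], y ≤ s :=
    fun y hy => PySem.List.max?_isMax hs y hy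
  -- the shared multiset
  have hM : ((-1 : Int) ::ₘ (-1 : Int) ::ₘ (nums : Multiset Int)) =
      ((-1 : Int) ::ₘ ((nums ++ [-1] : List Int) : Multiset Int)) := by
    congr 1
    exact (Multiset.coe_eq_coe.mpr (List.perm_append_singleton (-1) nums)).symm
  have hErase : ((-1 : Int) ::ₘ ((nums ++ [-1] : List Int) : Multiset Int)).erase m =
      (((nums ++ [-1]).erase m ++ [-1] : List Int) : Multiset Int) := by
    rw [Multiset.erase_cons_tail_of_mem (Multiset.mem_coe.mpr hmmem),
        Multiset.coe_erase]
    exact (Multiset.coe_eq_coe.mpr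
      (List.perm_append_singleton (-1) ((nums ++ [-1]).erase m))).symm
  -- B's result is Top2 of that multiset
  have htopB : Top2 ((-1 : Int) ::ₘ (-1 : Int) ::ₘ (nums : Multiset Int)) s m := by
    rw [hM]
    refine ⟨Multiset.mem_cons_of_mem (Multiset.mem_coe.mpr hmmem), ?_, ?_, ?_⟩
    · intro y hy
      rcases Multiset.mem_cons.mp hy with rfl | hy
      · exact hmax (-1) (by simp)
      · exact hmax y (Multiset.mem_coe.mp hy)
    · rw [hErase]; exact Multiset.mem_coe.mpr hsmem
    · intro y hy
      rw [hErase] at hy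
      exact hsmax y (Multiset.mem_coe.mp hy)
  -- A's result is Top2 of the same multiset
  have htopA := fold_top2 nums (-1) (-1) (le_refl _)
  have huniq := top2_unique htopA htopB
  simp only [solve, solve_alt, hm, hrem, hs, huniq.1, huniq.2]
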